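-- pv_equiv track=rewrite | github.com/andrewgryan/playground | python/injectable/image.py | driver
-- ===== SOURCE A (Python) =====
-- def driver(resolution: int):
--     """Generate image data at particular resolution"""
--     image = []
--     for i in range(resolution):
--         row = []
--         for j in range(resolution):
--             row.append(i + j)
--         image.append(row)
--     return image
-- ===== SOURCE B (Python) =====
-- def driver(resolution: int):
--     """Generate image data at particular resolution"""
--     if resolution <= 0:
--         return []
--     first = list(range(resolution))
--     image = [first]
--     prev = first
--     for _ in range(resolution - 1):
--         nxt = [x + 1 for x in prev]
--         image.append(nxt)
--         prev = nxt
--     return image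
-- ===== Notes on version B (the rewrite author's own statement) =====
-- stated objective: alternative
-- what changed: B builds the first row once and derives each subsequent row by adding 1 to the previous row, instead of recomputing i+j in a nested loop for every cell.
import Mathlib
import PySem

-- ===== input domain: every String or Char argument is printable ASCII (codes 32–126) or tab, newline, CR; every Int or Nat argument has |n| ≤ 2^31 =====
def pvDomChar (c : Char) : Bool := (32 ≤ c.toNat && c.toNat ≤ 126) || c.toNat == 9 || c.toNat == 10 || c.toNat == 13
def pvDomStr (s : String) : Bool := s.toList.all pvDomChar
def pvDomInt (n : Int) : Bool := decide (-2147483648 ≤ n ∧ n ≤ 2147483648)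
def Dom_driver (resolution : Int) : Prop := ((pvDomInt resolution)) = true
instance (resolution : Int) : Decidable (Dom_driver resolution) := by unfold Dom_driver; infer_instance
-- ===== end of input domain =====

-- B derives each row from the previous one by adding 1; alternative decomposition, same cost.


-- ===== PORT A =====
def driver (resolution : Int) : List (List Int) :=
  (PySem.List.pyRange 0 resolution 1).foldl
    (fun image i =>
      image ++ [(PySem.List.pyRange 0 resolution 1).foldl (fun row j => row ++ [i + j]) []])
    []

-- ===== PORT B =====
-- the remaining rows: each next row is previous row with 1 added to every element
def altRows (prev : List Int) : Nat → List (List Int)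
  | 0 => []
  | n + 1 =>
    let nxt := prev.map (· + 1)
    nxt :: altRows nxt n

def driver_alt (resolution : Int) : List (List Int) :=
  if resolution ≤ 0 then []
  else
    PySem.List.pyRange 0 resolution 1 ::
      altRows (PySem.List.pyRange 0 resolution 1) (resolution - 1).toNat

-- ===== PRECONDITION & SPEC =====
def Spec_driver (resolution : Int) (out : List (List Int)) : Prop := out = driver_alt resolution
instance (resolution : Int) (out : List (List Int)) : Decidable (Spec_driver resolution out) := by unfold Spec_driver; infer_instance

-- ===== CLAIM (what is proved, stated in full; the proofs are below) =====
def Claim_equal_driver : Prop := ∀ (resolution : Int), Dom_driver resolution → Spec_driver resolution (driver resolution)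

-- ===== LEMMAS AND PROOFS =====

-- row i of the n×n image
def pvRow (i : Int) (n : Nat) : List Int := (List.range n).map (fun j : Nat => i + (j : Int))

theorem foldl_append_singleton {α β : Type} (f : α → β) (l : List α) (init : List β) :
    l.foldl (fun acc x => acc ++ [f x]) init = init ++ l.map f := by
  induction l generalizing init with
  | nil => simp
  | cons x xs ih => simp [List.foldl, ih]

theorem pvRow_succ (i : Int) (n : Nat) : (pvRow i n).map (· + 1) = pvRow (i + 1) n := by
  simp only [pvRow, List.map_map]
  exact List.map_congr_left (fun k _ => by simp [Function.comp]; ring)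

theorem altRows_row (i : Int) (n : Nat) (k : Nat) :
    altRows (pvRow i n) k = (List.range k).map (fun t : Nat => pvRow (i + 1 + (t : Int)) n) := by
  induction k generalizing i with
  | zero => simp [altRows]
  | succ m ih =>
    rw [altRows, List.range_succ_eq_map]
    simp only [pvRow_succ, ih, List.map_cons, List.map_map, Nat.cast_zero, add_zero]
    refine congrArg₂ List.cons rfl ?_
    exact List.map_congr_left (fun t _ => by simp [Function.comp]; ring_nf)

theorem driver_eq_rows (r : Int) :
    driver r = (List.range r.toNat).map (fun i : Nat => pvRow (i : Int) r.toNat) := by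
  unfold driver
  rw [PySem.List.pyRange_one, foldl_append_singleton]
  simp only [List.nil_append, List.map_map, sub_zero]
  refine List.map_congr_left (fun i _ => ?_)
  simp only [Function.comp]
  rw [foldl_append_singleton]
  simp [pvRow]

theorem driver_alt_eq_rows (r : Int) :
    driver_alt r = (List.range r.toNat).map (fun i : Nat => pvRow (i : Int) r.toNat) := by
  unfold driver_alt
  split_ifs with h
  · have : r.toNat = 0 := Int.toNat_of_nonpos h
    simp [this]
  · have hfirst : PySem.List.pyRange 0 r 1 = pvRow 0 r.toNat := by
      rw [PySem.List.pyRange_one]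
      simp [pvRow]
    obtain ⟨m, hm⟩ : ∃ m, r.toNat = m + 1 := ⟨r.toNat - 1, by omega⟩
    have hm1 : (r - 1).toNat = m := by omega
    rw [hfirst, hm1, altRows_row, hm, List.range_succ_eq_map]
    simp only [List.map_cons, List.map_map, Nat.cast_zero]
    refine congrArg₂ List.cons ?_ ?_
    · simp [pvRow]
    · refine (List.map_congr_left (fun t _ => ?_)).trans rfl
      simp [Function.comp]
      congr 1
      ring

-- ===== VERDICT (by name: the statement is the Claim_ definition above) =====
theorem driver_spec : Claim_equal_driver := by
  intro r _
  unfold Spec_driver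
  rw [driver_eq_rows, driver_alt_eq_rows]
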